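-- pv_equiv track=rewrite | github.com/lenamariahackl/machine-translation | src/test.py | dicts_for_train_comparison
-- ===== SOURCE A (Python) =====
-- def dicts_for_train_comparison(e_train, f_train):
-- 	en_word_dict = {}
-- 	en_lang_order = 0
-- 	tk_word_dict = {}
-- 	tk_lang_order = 0
-- 	for sentence in e_train:
-- 		for token in sentence:
-- 			if token not in en_word_dict:
-- 				en_word_dict[token] = en_lang_order
-- 				en_lang_order += 1
-- 	for sentence in f_train:
-- 		for token in sentence:
-- 			if token not in tk_word_dict:
-- 				tk_word_dict[token] = tk_lang_order
-- 				tk_lang_order += 1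
-- 	return en_word_dict, tk_word_dict
-- ===== SOURCE B (Python) =====
-- def dicts_for_train_comparison(e_train, f_train):
-- 	def index_dict(corpus):
-- 		flat = [tok for sent in corpus for tok in sent]
-- 		first = {}
-- 		for i in range(len(flat) - 1, -1, -1):
-- 			first[flat[i]] = i
-- 		order = sorted(first, key=first.get)
-- 		return {tok: rank for rank, tok in enumerate(order)}
-- 	return index_dict(e_train), index_dict(f_train)
-- ===== Notes on version B (the rewrite author's own statement) =====
-- stated objective: alternative
-- what changed: Instead of incrementally assigning a running counter with a membership check, B records each token's first-occurrence position by overwriting a position dict while scanning the flattened corpus backwards, then sorts the distinct tokens by that position and ranks them by enumeration.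
import Mathlib
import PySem

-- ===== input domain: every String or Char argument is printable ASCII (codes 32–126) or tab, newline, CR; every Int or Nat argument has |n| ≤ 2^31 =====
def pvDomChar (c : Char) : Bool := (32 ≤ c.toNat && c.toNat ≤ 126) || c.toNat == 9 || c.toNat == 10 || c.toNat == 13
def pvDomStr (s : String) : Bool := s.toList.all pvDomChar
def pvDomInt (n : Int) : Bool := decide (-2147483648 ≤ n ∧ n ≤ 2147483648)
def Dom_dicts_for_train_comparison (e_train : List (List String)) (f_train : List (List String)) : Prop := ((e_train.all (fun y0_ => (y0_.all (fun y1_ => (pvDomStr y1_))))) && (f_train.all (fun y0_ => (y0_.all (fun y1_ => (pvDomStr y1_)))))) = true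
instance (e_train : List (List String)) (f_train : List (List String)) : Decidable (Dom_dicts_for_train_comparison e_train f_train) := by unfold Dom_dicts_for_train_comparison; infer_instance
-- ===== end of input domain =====

-- B replaces A's counter-with-membership-check loop by a different algorithm: record each
-- token's first-occurrence position by a backwards overwriting scan, then sort the distinct
-- tokens by that position and rank them (objective: alternative).

-- ===== PORT A =====
-- one token step of A's inner loop: insert with the running counter if unseen
def pvTokStep (st : PySem.Dict String Int × Int) (token : String) : PySem.Dict String Int × Int :=
  if st.1.contains token then st else (st.1.insert token st.2, st.2 + 1)

def pvSentLoop (st : PySem.Dict String Int × Int) (sentence : List String) : PySem.Dict String Int × Int :=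
  sentence.foldl pvTokStep st

def dicts_for_train_comparison (e_train : List (List String)) (f_train : List (List String)) : (List (String × Int)) × (List (String × Int)) :=
  let en := e_train.foldl pvSentLoop (PySem.Dict.empty, 0)
  let tk := f_train.foldl pvSentLoop (PySem.Dict.empty, 0)
  (en.1.items, tk.1.items)

-- ===== PORT B =====
-- flat = flattened corpus; first[flat[i]] = i for i = len-1 .. 0 (so the first occurrence wins);
-- order = sorted(first, key=first.get); {tok: rank for rank, tok in enumerate(order)}
def pvIndexDict (corpus : List (List String)) : List (String × Int) :=
  let flat := corpus.flatten
  let first := (PySem.List.pyRange ((flat.length : Int) - 1) (-1) (-1)).foldl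
      (fun d i => d.insert (PySem.List.pyGetD flat i "") i) PySem.Dict.empty
  let order := PySem.List.sorted first.keys (fun t => first.getD t 0) false
  (PySem.List.enumerate order 0).map (fun p => (p.2, p.1))

def dicts_for_train_comparison_alt (e_train : List (List String)) (f_train : List (List String)) : (List (String × Int)) × (List (String × Int)) :=
  (pvIndexDict e_train, pvIndexDict f_train)

-- ===== PRECONDITION & SPEC =====
def Spec_dicts_for_train_comparison (e_train : List (List String)) (f_train : List (List String)) (out : (List (String × Int)) × (List (String × Int))) : Prop := out = dicts_for_train_comparison_alt e_train f_train
instance (e_train : List (List String)) (f_train : List (List String)) (out : (List (String × Int)) × (List (String × Int))) : Decidable (Spec_dicts_for_train_comparison e_train f_train out) := by unfold Spec_dicts_for_train_comparison; infer_instance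

-- ===== CLAIM (what is proved, stated in full; the proofs are below) =====
def Claim_equal_dicts_for_train_comparison : Prop := ∀ (e_train : List (List String)) (f_train : List (List String)), Dom_dicts_for_train_comparison e_train f_train → Spec_dicts_for_train_comparison e_train f_train (dicts_for_train_comparison e_train f_train)

-- ===== LEMMAS AND PROOFS =====
-- proof-only canonical form: first-occurrence-ordered distinct tokens, enumerated
def pvCanon (corpus : List (List String)) : List (String × Int) :=
  (PySem.List.enumerate (PySem.Set.ofList corpus.flatten) 0).map (fun p => (p.2, p.1))

-- ---- A-side: A's state after having seen exactly the ordered-unique tokens u ----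
def pvStateD (u : List String) : PySem.Dict String Int :=
  PySem.Dict.mk ((PySem.List.enumerate u 0).map (fun p => (p.2, p.1)))

theorem pvStateD_keys (u : List String) : (pvStateD u).keys = u := by
  simp [pvStateD, PySem.Dict.keys, Function.comp_def, PySem.List.map_snd_enumerate]

theorem pvStateD_contains (u : List String) (t : String) :
    (pvStateD u).contains t = decide (t ∈ u) := by
  rw [PySem.Dict.contains_eq_decide_mem_keys, pvStateD_keys]

theorem pvStateD_append {t : String} (u : List String) (hu : t ∉ u) :
    (pvStateD u).insert t (u.length : Int) = pvStateD (u ++ [t]) := by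
  apply PySem.Dict.ext
  rw [PySem.Dict.items_insert_of_not_contains]
  · simp [pvStateD, PySem.List.enumerate_append, PySem.List.enumerate_cons]
  · simp [pvStateD_contains, hu]

theorem pvStep_invariant (ts u : List String) :
    ts.foldl pvTokStep (pvStateD u, (u.length : Int)) =
      (pvStateD (PySem.Set.update u ts), ((PySem.Set.update u ts).length : Int)) := by
  induction ts generalizing u with
  | nil => simp [PySem.Set.update]
  | cons t ts ih =>
      have hupd : PySem.Set.update u (t :: ts) = PySem.Set.update (PySem.Set.add u t) ts := by
        simp [PySem.Set.update]
      rw [List.foldl_cons, hupd]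
      by_cases h : t ∈ u
      · have : pvTokStep (pvStateD u, (u.length : Int)) t = (pvStateD u, (u.length : Int)) := by
          simp [pvTokStep, pvStateD_contains, h]
        rw [this, ih]
        simp [PySem.Set.add, PySem.Set.contains, h]
      · have hadd : PySem.Set.add u t = u ++ [t] := by
          simp [PySem.Set.add, PySem.Set.contains, h]
        have : pvTokStep (pvStateD u, (u.length : Int)) t
            = (pvStateD (u ++ [t]), ((u ++ [t]).length : Int)) := by
          simp [pvTokStep, pvStateD_contains, h, pvStateD_append u h]
        rw [this, ih, hadd]

theorem pvCorpusA_eq (c : List (List String)) :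
    (c.foldl pvSentLoop (PySem.Dict.empty, 0)).1.items = pvCanon c := by
  have hflat : c.foldl pvSentLoop (PySem.Dict.empty, 0)
      = c.flatten.foldl pvTokStep (PySem.Dict.empty, 0) := by
    rw [List.foldl_flatten]; rfl
  have hempty : (PySem.Dict.empty : PySem.Dict String Int) = pvStateD [] := rfl
  rw [hflat, hempty]
  have := pvStep_invariant c.flatten []
  simp only [List.length_nil, Nat.cast_zero] at this
  rw [this, PySem.Set.update_nil_left]
  rfl

-- ---- B-side ----
-- proof-only name for B's first-occurrence dict
def pvF (flat : List String) : PySem.Dict String Int :=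
  (PySem.List.pyRange ((flat.length : Int) - 1) (-1) (-1)).foldl
      (fun d i => d.insert (PySem.List.pyGetD flat i "") i) PySem.Dict.empty

theorem rev_range (n : Nat) : (List.range n).reverse = List.map (fun i => n - 1 - i) (List.range n) := by
  apply List.ext_getElem
  · simp
  · intro i h1 h2
    simp only [List.getElem_reverse, List.length_range, List.getElem_range, List.getElem_map]

theorem pvRange_down (n : Nat) :
    PySem.List.pyRange ((n : Int) - 1) (-1) (-1)
      = List.map (fun i : Nat => (i : Int)) (List.range n).reverse := by
  unfold PySem.List.pyRange
  rcases Nat.eq_zero_or_pos n with h | h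
  · subst h; simp
  · have h1 : ¬ ((-1 : Int) = 0) := by norm_num
    have h2 : ¬ ((0:Int) < -1) := by norm_num
    have h3 : (-1 : Int) < (n : Int) - 1 := by omega
    simp only [h1, if_false, h2, if_false, h3, if_true]
    have hc : ((((n:Int) - 1) - (-1) + -(-1) - 1) / -(-1)).toNat = n := by norm_num
    rw [hc, rev_range, List.map_map]
    apply List.map_congr_left
    intro k hk
    simp only [Function.comp]
    rw [List.mem_range] at hk
    omega

theorem pvScan (flat : List String) (n : Nat) :
    ∀ (d : PySem.Dict String Int), n ≤ flat.length → ∀ t,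
    ((List.range n).reverse.foldl (fun d (i : Nat) => d.insert (flat.getD i "") (i : Int)) d).get? t
      = if t ∈ flat.take n then some (((flat.take n).idxOf t : Nat) : Int) else d.get? t := by
  induction n with
  | zero => intro d _ t; simp
  | succ n ih =>
    intro d hn t
    have hlt : n < flat.length := by omega
    have hrev : (List.range (n+1)).reverse = n :: (List.range n).reverse := by
      rw [List.range_succ]; simp
    have htake : flat.take (n+1) = flat.take n ++ [flat[n]] :=
      List.take_succ_eq_append_getElem hlt
    have hgetD : flat.getD n "" = flat[n] := by
      rw [List.getD_eq_getElem?_getD, List.getElem?_eq_getElem hlt]; rfl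
    rw [hrev, List.foldl_cons, ih _ (by omega) t, hgetD, htake]
    by_cases hm : t ∈ flat.take n
    · have hm' : t ∈ flat.take n ++ [flat[n]] := List.mem_append_left _ hm
      rw [if_pos hm, if_pos hm', List.idxOf_append_of_mem hm]
    · rw [if_neg hm, PySem.Dict.get?_insert]
      by_cases he : t = flat[n]
      · have hm' : t ∈ flat.take n ++ [flat[n]] := by
          subst he; exact List.mem_append_right _ (by simp)
        rw [if_pos he, if_pos hm', List.idxOf_append_of_notMem hm]
        subst he
        simp [List.length_take, Nat.min_eq_left (Nat.le_of_lt hlt)]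
      · have hm' : t ∉ flat.take n ++ [flat[n]] := by
          rw [List.mem_append]
          push Not
          exact ⟨hm, by simp [he]⟩
        rw [if_neg he, if_neg hm']

theorem pvOfList_pairwise_idxOf (flat : List String) :
    (PySem.Set.ofList flat).Pairwise (fun a b => flat.idxOf a < flat.idxOf b) := by
  induction flat using List.reverseRecOn with
  | nil => simp [PySem.Set.ofList]
  | append_singleton xs x ih =>
    have hadd : PySem.Set.ofList (xs ++ [x])
        = if x ∈ xs then PySem.Set.ofList xs else PySem.Set.ofList xs ++ [x] := by
      rw [PySem.Set.ofList_append]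
      simp [PySem.Set.update, PySem.Set.add, PySem.Set.contains, PySem.Set.mem_ofList]
    by_cases hx : x ∈ xs
    · rw [hadd, if_pos hx]
      refine List.Pairwise.imp_of_mem (fun {a b} ha hb r => ?_) ih
      rw [List.idxOf_append_of_mem ((PySem.Set.mem_ofList xs a).mp ha),
          List.idxOf_append_of_mem ((PySem.Set.mem_ofList xs b).mp hb)]
      exact r
    · rw [hadd, if_neg hx, List.pairwise_append]
      refine ⟨?_, by simp, ?_⟩
      · refine List.Pairwise.imp_of_mem (fun {a b} ha hb r => ?_) ih
        rw [List.idxOf_append_of_mem ((PySem.Set.mem_ofList xs a).mp ha),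
            List.idxOf_append_of_mem ((PySem.Set.mem_ofList xs b).mp hb)]
        exact r
      · intro a ha b hb
        have ha' : a ∈ xs := (PySem.Set.mem_ofList xs a).mp ha
        rw [List.mem_singleton] at hb
        subst hb
        rw [List.idxOf_append_of_mem ha', List.idxOf_append_of_notMem hx]
        have := List.idxOf_lt_length_of_mem ha'
        simp
        omega

theorem pvMap_getD_range (flat : List String) :
    List.map (fun i => flat.getD i "") (List.range flat.length) = flat := by
  apply List.ext_getElem
  · simp
  · intro i h1 h2
    simp only [List.getElem_map, List.getElem_range]
    rw [List.getD_eq_getElem?_getD, List.getElem?_eq_getElem h2]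
    rfl

theorem pvF_get? (flat : List String) (t : String) (ht : t ∈ flat) :
    (pvF flat).get? t = some ((flat.idxOf t : Nat) : Int) := by
  unfold pvF
  rw [pvRange_down, List.foldl_map]
  simp only [PySem.List.pyGetD_natCast]
  rw [pvScan flat flat.length PySem.Dict.empty le_rfl t]
  rw [List.take_length]
  rw [if_pos ht]

theorem pvF_keys (flat : List String) : (pvF flat).keys = PySem.Set.ofList flat.reverse := by
  unfold pvF
  rw [PySem.Dict.keys_foldl_insert_key _ (fun i => PySem.List.pyGetD flat i "") (fun _ i => i)]
  rw [PySem.Dict.keys_empty, PySem.Set.update_nil_left]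
  congr 1
  rw [pvRange_down, List.map_map]
  calc List.map ((fun i => PySem.List.pyGetD flat i "") ∘ (fun i : Nat => (i : Int)))
        (List.range flat.length).reverse
      = List.map (fun i : Nat => flat.getD i "") (List.range flat.length).reverse := by
        apply List.map_congr_left; intro i _; simp [PySem.List.pyGetD_natCast]
    _ = (List.map (fun i : Nat => flat.getD i "") (List.range flat.length)).reverse := by
        rw [List.map_reverse]
    _ = flat.reverse := by rw [pvMap_getD_range]

theorem pvSorted_eq (flat : List String) :
    PySem.List.sorted (pvF flat).keys (fun t => (pvF flat).getD t 0) false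
      = PySem.Set.ofList flat := by
  apply PySem.List.sorted_eq_of_perm_of_pairwise_lt
  · rw [pvF_keys]
    apply (List.perm_ext_iff_of_nodup (PySem.Set.nodup_ofList _) (PySem.Set.nodup_ofList _)).mpr
    intro a
    rw [PySem.Set.mem_ofList, PySem.Set.mem_ofList, List.mem_reverse]
  · refine List.Pairwise.imp_of_mem (fun {a b} ha hb r => ?_) (pvOfList_pairwise_idxOf flat)
    rw [PySem.Dict.getD_of_get?_eq_some _ 0 (pvF_get? flat a ((PySem.Set.mem_ofList flat a).mp ha)),
        PySem.Dict.getD_of_get?_eq_some _ 0 (pvF_get? flat b ((PySem.Set.mem_ofList flat b).mp hb))]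
    exact_mod_cast r

theorem pvCorpusB_eq (c : List (List String)) : pvIndexDict c = pvCanon c := by
  have h : pvIndexDict c
      = (PySem.List.enumerate (PySem.List.sorted (pvF c.flatten).keys
            (fun t => (pvF c.flatten).getD t 0) false) 0).map (fun p => (p.2, p.1)) := rfl
  rw [h, pvSorted_eq]
  rfl

-- ===== VERDICT (by name: the statement is the Claim_ definition above) =====
theorem dicts_for_train_comparison_spec : Claim_equal_dicts_for_train_comparison := by
  intro e f _
  unfold Spec_dicts_for_train_comparison dicts_for_train_comparison dicts_for_train_comparison_alt
  simp [pvCorpusA_eq, pvCorpusB_eq]
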